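-- pv_equiv track=rewrite | github.com/oddhoe/mrfylke-trendanalyse | Normaltransport/nvdb_to_gdb_v904_v2.py | pick_property
-- ===== SOURCE A (Python) =====
-- from typing import Any, Dict, Iterable, Optional, Tuple
--
-- def pick_property(egenskaper: list[Dict[str, Any]], name_contains: list[str]) -> Optional[Dict[str, Any]]:
--     if not egenskaper:
--         return None
--     for e in egenskaper:
--         navn = (e.get("navn") or "").lower()
--         for sub in name_contains:
--             if sub.lower() in navn:
--                 return e
--     return None
-- ===== SOURCE B (Python) =====
-- def pick_property(egenskaper, name_contains):
--     # Loop interchange: for each substring find the index of the FIRST entry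
--     # whose lowered name contains it, then return the entry at the minimal
--     # such index.  Correct because A returns the entry with the smallest
--     # index matching ANY substring.
--     names = [(e.get("navn") or "").lower() for e in egenskaper]
--     best = None
--     for sub in name_contains:
--         s = sub.lower()
--         for i, navn in enumerate(names):
--             if s in navn:
--                 if best is None or i < best:
--                     best = i
--                 break
--     return None if best is None else egenskaper[best]
-- ===== Notes on version B (the rewrite author's own statement) =====
-- stated objective: alternative
-- what changed: Interchanges the loops: instead of scanning entries and testing all substrings per entry with an early return, B precomputes the lowered names once, then for each substring finds the index of its first matching entry and returns the entry at the minimal matching index (first match = minimal index over substrings).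
import Mathlib
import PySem

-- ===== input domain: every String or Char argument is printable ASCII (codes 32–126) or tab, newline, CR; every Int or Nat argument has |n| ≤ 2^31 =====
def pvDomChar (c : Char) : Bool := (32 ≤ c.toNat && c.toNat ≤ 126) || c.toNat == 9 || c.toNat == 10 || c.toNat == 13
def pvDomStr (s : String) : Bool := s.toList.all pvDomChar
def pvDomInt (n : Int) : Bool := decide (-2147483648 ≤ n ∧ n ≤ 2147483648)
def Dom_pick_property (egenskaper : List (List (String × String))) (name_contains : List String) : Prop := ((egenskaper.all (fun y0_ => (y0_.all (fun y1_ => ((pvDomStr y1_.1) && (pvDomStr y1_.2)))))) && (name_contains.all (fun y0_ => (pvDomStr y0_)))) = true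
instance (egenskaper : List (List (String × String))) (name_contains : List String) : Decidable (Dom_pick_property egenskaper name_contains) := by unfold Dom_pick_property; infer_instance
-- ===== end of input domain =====

-- B interchanges A's loops: it precomputes the lowered names, finds per substring
-- the index of its first matching entry, and returns the entry at the minimal
-- matching index (alternative decomposition; same cost).

-- ===== PORT A =====
-- inner loop of A: 'for sub in name_contains: if sub.lower() in navn: return e'
def pickInnerA (e : List (String × String)) (navn : String) :
    List String → Option (List (String × String))
  | [] => none
  | sub :: rest =>
    if PySem.Str.isIn (PySem.Str.lower sub) navn then some e
    else pickInnerA e navn rest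

-- outer loop of A: 'for e in egenskaper: …'
def pickOuterA (name_contains : List String) :
    List (List (String × String)) → Option (List (String × String))
  | [] => none
  | e :: rest =>
    -- navn = (e.get("navn") or "").lower()  ('or ""' maps both a missing key and "" to "")
    let navn := PySem.Str.lower ((PySem.Dict.get? (PySem.Dict.mk e) "navn").getD "")
    match pickInnerA e navn name_contains with
    | some r => some r
    | none => pickOuterA name_contains rest

def pick_property (egenskaper : List (List (String × String))) (name_contains : List String) : Option (List (String × String)) :=
  if egenskaper = [] then none
  else pickOuterA name_contains egenskaper

-- ===== PORT B =====
-- inner loop of B: 'for i, navn in enumerate(names): if s in navn: …; break'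
def firstMatchIdxB (s : String) : Nat → List String → Option Nat
  | _, [] => none
  | i, navn :: rest =>
    if PySem.Str.isIn s navn then some i else firstMatchIdxB s (i + 1) rest

-- outer loop of B: 'for sub in name_contains: …' maintaining 'best'
def bestLoopB (names : List String) : Option Nat → List String → Option Nat
  | best, [] => best
  | best, sub :: rest =>
    let s := PySem.Str.lower sub
    let best' :=
      match firstMatchIdxB s 0 names with
      | none => best
      | some i =>
        match best with
        | none => some i
        | some b => if i < b then some i else best
    bestLoopB names best' rest

def pick_property_alt (egenskaper : List (List (String × String))) (name_contains : List String) : Option (List (String × String)) :=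
  -- names = [(e.get("navn") or "").lower() for e in egenskaper]
  match bestLoopB (egenskaper.map
      (fun e => PySem.Str.lower ((PySem.Dict.get? (PySem.Dict.mk e) "navn").getD "")))
    none name_contains with
  | none => none
  -- 'egenskaper[best]' : best is an index produced by enumerate(names), so it is
  -- always in range; getElem? is exact here (it is always 'some').
  | some i => egenskaper[i]?

-- ===== PRECONDITION & SPEC =====
def Spec_pick_property (egenskaper : List (List (String × String))) (name_contains : List String) (out : Option (List (String × String))) : Prop := out = pick_property_alt egenskaper name_contains
instance (egenskaper : List (List (String × String))) (name_contains : List String) (out : Option (List (String × String))) : Decidable (Spec_pick_property egenskaper name_contains out) := by unfold Spec_pick_property; infer_instance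

-- ===== CLAIM (what is proved, stated in full; the proofs are below) =====
def Claim_equal_pick_property : Prop := ∀ (egenskaper : List (List (String × String))) (name_contains : List String), Dom_pick_property egenskaper name_contains → Spec_pick_property egenskaper name_contains (pick_property egenskaper name_contains)

-- ===== LEMMAS AND PROOFS =====

-- min on Option Nat (none = "no match" = +infinity)
def omin : Option Nat → Option Nat → Option Nat
  | none, b => b
  | some a, none => some a
  | some a, some b => some (Nat.min a b)

theorem omin_none_right (a : Option Nat) : omin a none = a := by
  cases a <;> rfl

theorem omin_assoc (a b c : Option Nat) : omin (omin a b) c = omin a (omin b c) := by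
  cases a <;> cases b <;> cases c <;> simp [omin, Nat.min_assoc]

theorem omin_map_succ (a b : Option Nat) :
    omin (a.map (· + 1)) (b.map (· + 1)) = (omin a b).map (· + 1) := by
  cases a <;> cases b <;> simp [omin, Nat.min_def] <;> split <;> omega

-- B's inner loop is findIdx? with an offset
theorem firstMatchIdxB_eq (s : String) (l : List String) (i : Nat) :
    firstMatchIdxB s i l = (l.findIdx? (fun n => PySem.Str.isIn s n)).map (· + i) := by
  induction l generalizing i with
  | nil => simp [firstMatchIdxB]
  | cons n rest ih =>
    simp only [firstMatchIdxB, List.findIdx?_cons]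
    by_cases h : PySem.Str.isIn s n = true
    · rw [if_pos h, if_pos h]; simp
    · rw [if_neg h, if_neg h, ih, Option.map_map]
      cases List.findIdx? (fun n => PySem.Str.isIn s n) rest <;> simp <;> omega

-- first index of a disjunction = omin of the first indices
theorem findIdx?_or (p q : String → Bool) (l : List String) :
    l.findIdx? (fun n => p n || q n) = omin (l.findIdx? p) (l.findIdx? q) := by
  induction l with
  | nil => rfl
  | cons n rest ih =>
    simp only [List.findIdx?_cons]
    by_cases hp : p n = true <;> by_cases hq : q n = true <;>
      simp only [hp, hq, Bool.true_or, Bool.false_or, Bool.or_false,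
        eq_self_iff_true, if_true, if_false, Bool.false_eq_true]
    · rfl
    · cases List.findIdx? q rest <;> rfl
    · cases List.findIdx? p rest <;> rfl
    · rw [ih, omin_map_succ]

-- B's outer loop computes omin(best, first index matching any substring)
theorem bestLoopB_eq (names : List String) (subs : List String) (best : Option Nat) :
    bestLoopB names best subs =
      omin best (names.findIdx?
        (fun n => subs.any (fun sub => PySem.Str.isIn (PySem.Str.lower sub) n))) := by
  induction subs generalizing best with
  | nil =>
    have hnone : names.findIdx? (fun (_ : String) => false) = none := by
      induction names with
      | nil => rfl
      | cons a l ih => simp [List.findIdx?_cons, ih]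
    simp only [bestLoopB, List.any_nil, hnone, omin_none_right]
  | cons sub rest ih =>
    rw [show bestLoopB names best (sub :: rest) = bestLoopB names
        (match firstMatchIdxB (PySem.Str.lower sub) 0 names with
          | none => best
          | some i =>
            match best with
            | none => some i
            | some b => if i < b then some i else best) rest from rfl]
    have hupd :
        (match firstMatchIdxB (PySem.Str.lower sub) 0 names with
          | none => best
          | some i =>
            match best with
            | none => some i
            | some b => if i < b then some i else best) =
        omin best (names.findIdx? (fun n => PySem.Str.isIn (PySem.Str.lower sub) n)) := by
      rw [firstMatchIdxB_eq]
      cases hm : names.findIdx? (fun n => PySem.Str.isIn (PySem.Str.lower sub) n) with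
      | none => cases best <;> rfl
      | some i =>
        cases best with
        | none => rfl
        | some b =>
          simp only [Option.map_some, omin, Nat.min_def]
          split <;> split <;> first | rfl | omega
    rw [hupd, ih]
    simp only [List.any_cons]
    rw [findIdx?_or, ← omin_assoc]

-- A's inner loop is the boolean 'any' test
theorem pickInnerA_eq (e : List (String × String)) (navn : String) (ncs : List String) :
    pickInnerA e navn ncs =
      if ncs.any (fun sub => PySem.Str.isIn (PySem.Str.lower sub) navn) then some e else none := by
  induction ncs with
  | nil => simp [pickInnerA]
  | cons sub rest ih =>
    simp only [pickInnerA, List.any_cons, ih]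
    by_cases h : PySem.Str.isIn (PySem.Str.lower sub) navn = true
    · rw [if_pos h, if_pos (by rw [h, Bool.true_or])]
    · rw [if_neg h]
      simp only [Bool.eq_false_iff.mpr h, Bool.false_or]

-- A's outer loop, expressed through the first matching index of the mapped names
theorem pickOuterA_eq (ncs : List String) (eg : List (List (String × String))) :
    pickOuterA ncs eg =
      match (eg.map (fun e =>
          PySem.Str.lower ((PySem.Dict.get? (PySem.Dict.mk e) "navn").getD ""))).findIdx?
          (fun n => ncs.any (fun sub => PySem.Str.isIn (PySem.Str.lower sub) n)) with
      | none => none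
      | some i => eg[i]? := by
  induction eg with
  | nil => simp [pickOuterA]
  | cons e rest ih =>
    simp only [pickOuterA, pickInnerA_eq, List.map_cons, List.findIdx?_cons]
    by_cases h : (ncs.any fun sub =>
        PySem.Str.isIn (PySem.Str.lower sub)
          (PySem.Str.lower ((PySem.Dict.get? (PySem.Dict.mk e) "navn").getD ""))) = true
    · rw [if_pos h, if_pos h]
      rfl
    · rw [if_neg h, if_neg h]
      show pickOuterA ncs rest = _
      rw [ih]
      cases (rest.map (fun e =>
          PySem.Str.lower ((PySem.Dict.get? (PySem.Dict.mk e) "navn").getD ""))).findIdx?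
          (fun n => ncs.any (fun sub => PySem.Str.isIn (PySem.Str.lower sub) n)) with
      | none => rfl
      | some i => simp

-- ===== VERDICT (by name: the statement is the Claim_ definition above) =====
theorem pick_property_spec : Claim_equal_pick_property := by
  intro eg ncs _
  unfold Spec_pick_property pick_property pick_property_alt
  rw [bestLoopB_eq]
  simp only [omin]
  split
  · subst ‹eg = []›
    simp
  · exact pickOuterA_eq ncs eg
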